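-- pv_equiv track=rewrite | github.com/Hanishsaini/dsa-leetcode | question3623.py | countTrapezoids
-- ===== SOURCE A (Python) =====
-- def countTrapezoids(points):
--     MOD = 10**9 + 7
--     from collections import defaultdict
--
--     freq = defaultdict(int)
--
--     # Count how many points exist on each horizontal line (same y)
--     for x, y in points:
--         freq[y] += 1
--
--     # Count horizontal segments on each level = C(n,2)
--     seg = []
--     for y in freq:
--         c = freq[y]
--         if c >= 2:
--             seg.append(c * (c - 1) // 2)
--
--     if len(seg) < 2:
--         return 0
--
--     # Count all pairs: seg[i] * seg[j] for i < j
--     total = sum(seg)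
--     ans = 0
--
--     for s in seg:
--         total -= s
--         ans = (ans + s * total) % MOD
--
--     return ans
-- ===== SOURCE B (Python) =====
-- def countTrapezoids(points):
--     MOD = 10**9 + 7
--     counts = {}
--     for x, y in points:
--         counts[y] = counts.get(y, 0) + 1
--     S = 0
--     Q = 0
--     for c in counts.values():
--         if c >= 2:
--             s = c * (c - 1) // 2
--             S += s
--             Q += s * s
--     # sum of pairwise products seg[i]*seg[j] (i<j) = (S^2 - sum of squares) / 2, exactly
--     return ((S * S - Q) // 2) % MOD
-- ===== Notes on version B (the rewrite author's own statement) =====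
-- stated objective: simpler
-- what changed: Replaces the seg list, the len<2 guard and the running-total pairwise-product loop by a single pass accumulating S and Q (sum and sum of squares of per-level segment counts) and the exact closed form ((S*S-Q)//2) % MOD.
import Mathlib
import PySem

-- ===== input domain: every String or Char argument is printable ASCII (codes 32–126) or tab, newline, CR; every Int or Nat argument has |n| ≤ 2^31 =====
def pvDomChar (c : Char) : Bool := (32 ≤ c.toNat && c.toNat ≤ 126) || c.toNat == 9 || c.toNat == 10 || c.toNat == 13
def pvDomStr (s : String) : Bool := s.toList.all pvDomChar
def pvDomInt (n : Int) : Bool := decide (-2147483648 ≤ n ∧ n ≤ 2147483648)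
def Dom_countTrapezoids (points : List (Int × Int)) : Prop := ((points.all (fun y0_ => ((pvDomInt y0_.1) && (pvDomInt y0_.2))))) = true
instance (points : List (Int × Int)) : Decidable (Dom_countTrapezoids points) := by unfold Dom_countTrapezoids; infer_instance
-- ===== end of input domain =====

-- B replaces A's seg list, len<2 guard and running-total pairwise loop by one (S, Q) pass
-- and the exact closed form ((S*S - Q)//2) % MOD; same return value everywhere.

-- ===== PORT A =====
def countTrapezoids (points : List (Int × Int)) : Int :=
  let MOD : Int := 1000000007
  let freq := points.foldl (fun d p => d.modify p.2 0 (· + 1)) (PySem.Dict.empty : PySem.Dict Int Int)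
  let seg := freq.keys.foldl (fun acc y =>
      let c := freq.getD y 0
      if 2 ≤ c then acc ++ [PySem.Int.floordiv (c * (c - 1)) 2] else acc) ([] : List Int)
  if seg.length < 2 then 0
  else
    let total := seg.sum
    let st := seg.foldl (fun (st : Int × Int) s =>
        let t := st.1 - s
        (t, PySem.Int.mod (st.2 + s * t) MOD)) (total, 0)
    st.2

-- ===== PORT B =====
def countTrapezoids_alt (points : List (Int × Int)) : Int :=
  let MOD : Int := 1000000007
  let counts := points.foldl (fun d p => d.insert p.2 (d.getD p.2 0 + 1)) (PySem.Dict.empty : PySem.Dict Int Int)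
  let sq := counts.values.foldl (fun (sq : Int × Int) c =>
      if 2 ≤ c then
        let s := PySem.Int.floordiv (c * (c - 1)) 2
        (sq.1 + s, sq.2 + s * s)
      else sq) ((0, 0) : Int × Int)
  PySem.Int.mod (PySem.Int.floordiv (sq.1 * sq.1 - sq.2) 2) MOD

-- ===== PRECONDITION & SPEC =====
def Spec_countTrapezoids (points : List (Int × Int)) (out : Int) : Prop := out = countTrapezoids_alt points
instance (points : List (Int × Int)) (out : Int) : Decidable (Spec_countTrapezoids points out) := by unfold Spec_countTrapezoids; infer_instance

-- ===== CLAIM (what is proved, stated in full; the proofs are below) =====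
def Claim_equal_countTrapezoids : Prop := ∀ (points : List (Int × Int)), Dom_countTrapezoids points → Spec_countTrapezoids points (countTrapezoids points)

-- ===== LEMMAS AND PROOFS =====

def pvTri (c : Int) : Int := PySem.Int.floordiv (c * (c - 1)) 2

def pvSegOf (cs : List Int) : List Int := (cs.filter (fun c => decide (2 ≤ c))).map pvTri

def pvPP : List Int → Int
  | [] => 0
  | s :: l => s * l.sum + pvPP l

-- A's seg-building fold over the dict keys, as a pure function of the count list
theorem pvSegA (ks : List Int) (cnt : Int → Int) (acc : List Int) :
    ks.foldl (fun acc y => if 2 ≤ cnt y then acc ++ [PySem.Int.floordiv (cnt y * (cnt y - 1)) 2] else acc) acc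
      = acc ++ pvSegOf (ks.map cnt) := by
  induction ks generalizing acc with
  | nil => simp [pvSegOf]
  | cons k ks ih =>
    simp only [List.foldl_cons, ih, List.map_cons, pvSegOf, List.filter_cons]
    by_cases h : 2 ≤ cnt k <;> simp [h, pvTri]

-- B's (S, Q) fold equals (sum, sum of squares) of the segment list
theorem pvSqB (cs : List Int) (S Q : Int) :
    cs.foldl (fun (sq : Int × Int) c =>
        if 2 ≤ c then
          let s := PySem.Int.floordiv (c * (c - 1)) 2
          (sq.1 + s, sq.2 + s * s)
        else sq) (S, Q)
      = (S + (pvSegOf cs).sum, Q + ((pvSegOf cs).map (fun s => s * s)).sum) := by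
  induction cs generalizing S Q with
  | nil => simp [pvSegOf]
  | cons c cs ih =>
    rw [List.foldl_cons]
    by_cases h : 2 ≤ c
    · have hacc : (if 2 ≤ c then
            let s := PySem.Int.floordiv (c * (c - 1)) 2
            ((S, Q).1 + s, (S, Q).2 + s * s)
          else (S, Q)) = (S + pvTri c, Q + pvTri c * pvTri c) := by simp [h, pvTri]
      rw [hacc, ih]
      simp only [pvSegOf, List.filter_cons, h, decide_true, if_pos, List.map_cons,
        List.sum_cons, Prod.mk.injEq]
      constructor <;> ring
    · have hacc : (if 2 ≤ c then
            let s := PySem.Int.floordiv (c * (c - 1)) 2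
            ((S, Q).1 + s, (S, Q).2 + s * s)
          else (S, Q)) = (S, Q) := by simp [h]
      rw [hacc, ih]
      simp [pvSegOf, h]

-- closed form: twice the sum of pairwise products
theorem pvTwoPP (l : List Int) :
    2 * pvPP l = l.sum * l.sum - (l.map (fun s => s * s)).sum := by
  induction l with
  | nil => simp [pvPP]
  | cons s l ih =>
    simp only [pvPP, List.sum_cons, List.map_cons]
    nlinarith [ih]

theorem pvPP_small (l : List Int) (h : l.length < 2) : pvPP l = 0 := by
  match l, h with
  | [], _ => rfl
  | [s], _ => simp [pvPP]

-- A's running-total loop computes pvPP modulo MOD (on a nonempty list)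
theorem pvLoopA (l : List Int) : ∀ (s a : Int),
    ((s :: l).foldl (fun (st : Int × Int) s =>
        let t := st.1 - s
        (t, PySem.Int.mod (st.2 + s * t) 1000000007)) ((s :: l).sum, a)).2
      = PySem.Int.mod (a + pvPP (s :: l)) 1000000007 := by
  induction l with
  | nil =>
    intro s a
    simp [pvPP]
  | cons s' l ih =>
    intro s a
    have hstep : ((s :: s' :: l).foldl (fun (st : Int × Int) s =>
          let t := st.1 - s
          (t, PySem.Int.mod (st.2 + s * t) 1000000007)) ((s :: s' :: l).sum, a))
        = ((s' :: l).foldl (fun (st : Int × Int) s =>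
          let t := st.1 - s
          (t, PySem.Int.mod (st.2 + s * t) 1000000007))
            ((s' :: l).sum, PySem.Int.mod (a + s * (s' + l.sum)) 1000000007)) := by
      simp only [List.foldl_cons, List.sum_cons]
      have h1 : s + (s' + l.sum) - s = s' + l.sum := by ring
      rw [h1]
    rw [hstep, ih]
    rw [show pvPP (s :: s' :: l) = s * (s' + l.sum) + pvPP (s' :: l) from by
      simp [pvPP]]
    simp only [PySem.Int.mod_eq_emod_of_pos (show (0:Int) < 1000000007 by norm_num)]
    rw [Int.emod_add_emod]
    ring_nf

theorem pvClosed (seg : List Int) :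
    PySem.Int.mod (PySem.Int.floordiv (seg.sum * seg.sum - (seg.map (fun s => s * s)).sum) 2)
        1000000007
      = PySem.Int.mod (pvPP seg) 1000000007 := by
  rw [← pvTwoPP, PySem.Int.floordiv_eq_ediv_of_pos (show (0:Int) < 2 by norm_num),
    Int.mul_ediv_cancel_left _ (show (2:Int) ≠ 0 by norm_num)]

-- ===== VERDICT (by name: the statement is the Claim_ definition above) =====
theorem countTrapezoids_spec : Claim_equal_countTrapezoids := by
  intro points _
  unfold Spec_countTrapezoids countTrapezoids countTrapezoids_alt
  simp only []
  rw [show points.foldl (fun d p => d.modify p.2 0 (· + 1)) (PySem.Dict.empty : PySem.Dict Int Int)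
        = PySem.Dict.counter (points.map Prod.snd) from by
      rw [PySem.Dict.counter_eq_foldl]
      exact (List.foldl_map (f := Prod.snd)
        (g := fun (d : PySem.Dict Int Int) x => d.modify x 0 (· + 1))).symm,
    show points.foldl (fun d p => d.insert p.2 (d.getD p.2 0 + 1)) (PySem.Dict.empty : PySem.Dict Int Int)
        = PySem.Dict.counter (points.map Prod.snd) from by
      rw [← PySem.Dict.foldl_insert_getD_add_one_eq_counter]
      exact (List.foldl_map (f := Prod.snd)
        (g := fun (d : PySem.Dict Int Int) x => d.insert x (d.getD x 0 + 1))).symm]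
  set ys := points.map Prod.snd with hys
  have hvals : (PySem.Dict.counter ys).values
      = (PySem.Set.ofList ys).map (fun k => (ys.count k : Int)) := by
    simp [PySem.Dict.values, PySem.Dict.items_counter]
  rw [PySem.Dict.keys_counter, hvals]
  simp only [PySem.Dict.getD_counter]
  rw [pvSegA (PySem.Set.ofList ys) (fun k => (ys.count k : Int)) [], pvSqB]
  set seg := pvSegOf ((PySem.Set.ofList ys).map (fun k => (ys.count k : Int))) with hseg
  simp only [List.nil_append, zero_add]
  rw [pvClosed]
  by_cases hlen : seg.length < 2
  · rw [if_pos hlen, pvPP_small seg hlen]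
    simp
  · rw [if_neg hlen]
    match seg, hlen with
    | s :: rest, _ =>
      rw [pvLoopA rest s 0, zero_add]
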